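-- pv_equiv track=rewrite | github.com/Sawyerg3/advent-of-code-23 | day1/part2.py | checkWordFront
-- ===== SOURCE A (Python) =====
-- def checkWordFront(line):
--     numbers = ["one", "two", "three", "four", "five", "six", "seven", "eight", "nine"]
--     temp, pos = 0, 0
--     val, x = 0 , 0
--
--     for num in numbers:
--         x += 1
--         temp = line.find(num)
--         if temp > -1 and (temp < pos or val == 0):
--             pos = temp
--             val = x
--
--     return val, pos
-- ===== SOURCE B (Python) =====
-- def checkWordFront(line):
--     numbers = ["one", "two", "three", "four", "five", "six", "seven", "eight", "nine"]
--     for i in range(len(line)):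
--         for j, w in enumerate(numbers):
--             if line.startswith(w, i):
--                 return j + 1, i
--     return 0, 0
-- ===== Notes on version B (the rewrite author's own statement) =====
-- stated objective: alternative
-- what changed: Replaces A's nine whole-line str.find scans plus a running-minimum/first-index reduction with a single left-to-right positional scan that returns at the first position where any number-word starts.
import Mathlib
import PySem

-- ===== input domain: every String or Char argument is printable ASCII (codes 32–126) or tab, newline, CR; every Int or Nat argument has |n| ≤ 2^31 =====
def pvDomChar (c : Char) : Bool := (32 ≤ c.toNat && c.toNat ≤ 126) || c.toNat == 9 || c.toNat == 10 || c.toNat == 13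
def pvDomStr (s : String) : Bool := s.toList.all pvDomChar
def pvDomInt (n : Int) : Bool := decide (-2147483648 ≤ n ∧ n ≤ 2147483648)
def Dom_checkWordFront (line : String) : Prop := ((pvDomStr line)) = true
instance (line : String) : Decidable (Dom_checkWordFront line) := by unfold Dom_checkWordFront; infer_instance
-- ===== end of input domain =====

-- B replaces A's nine whole-line `find` scans plus running-minimum selection by a single
-- left-to-right positional scan that returns at the first position where a number-word starts
-- (alternative decomposition; not claimed faster).

-- ===== PORT A =====
def cwfNumbers : List String := ["one", "two", "three", "four", "five", "six", "seven", "eight", "nine"]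

-- loop body of A's `for num in numbers`; state st = (pos, val, x)
def cwfStep (line : String) (st : Int × Int × Int) (num : String) : Int × Int × Int :=
  let x := st.2.2 + 1
  let temp := PySem.Str.find line num
  if temp > -1 ∧ (temp < st.1 ∨ st.2.1 = 0) then (temp, x, x) else (st.1, st.2.1, x)

def checkWordFront (line : String) : Int × Int :=
  let st := cwfNumbers.foldl (cwfStep line) (0, 0, 0)
  (st.2.1, st.1)

-- ===== PORT B =====
-- inner loop `for j, w in enumerate(numbers): if line.startswith(w, i): return j+1, i`;
-- suf = line[i:] is carried structurally, and startswith(w, i) = startswith of suf (exact for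
-- 0 <= i < len(line), the only i the outer loop produces); j is the 0-based enumerate counter
def cwfInner (suf : List Char) (ws : List String) (j : Int) : Option Int :=
  match ws with
  | [] => none
  | w :: rest =>
    if PySem.Chars.startswith suf w.toList then some (j + 1)
    else cwfInner suf rest (j + 1)

-- outer loop `for i in range(len(line))`; suf = line[i:]
def cwfScan (suf : List Char) (i : Int) : Int × Int :=
  match suf with
  | [] => (0, 0)
  | _ :: t =>
    match cwfInner suf cwfNumbers 0 with
    | some v => (v, i)
    | none => cwfScan t (i + 1)

def checkWordFront_alt (line : String) : Int × Int :=
  cwfScan line.toList 0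

-- ===== PRECONDITION & SPEC =====
def Spec_checkWordFront (line : String) (out : Int × Int) : Prop := out = checkWordFront_alt line
instance (line : String) (out : Int × Int) : Decidable (Spec_checkWordFront line out) := by unfold Spec_checkWordFront; infer_instance

-- ===== CLAIM (what is proved, stated in full; the proofs are below) =====
def Claim_equal_checkWordFront : Prop := ∀ (line : String), Dom_checkWordFront line → Spec_checkWordFront line (checkWordFront line)

-- ===== LEMMAS AND PROOFS =====

-- facts about Chars.find as "first occurrence"
theorem cwf_find_ge_of (l u : List Char) (m : Nat) (h : ∀ i < m, ¬ u <+: l.drop i) :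
    PySem.Chars.find l u = -1 ∨ (m : Int) ≤ PySem.Chars.find l u := by
  by_cases hne : PySem.Chars.find l u = -1
  · exact Or.inl hne
  · right
    have h0 : 0 ≤ PySem.Chars.find l u := by
      have := PySem.Chars.neg_one_le_find (s := l) (sub := u)
      omega
    obtain ⟨hpre, _⟩ := PySem.Chars.find_spec (s := l) (sub := u) h0
    by_contra hlt
    have hlt' : (PySem.Chars.find l u).toNat < m := by omega
    exact h _ hlt' (by
      have : ((PySem.Chars.find l u).toNat : Int) = PySem.Chars.find l u := by omega
      exact hpre)

theorem cwf_prefix_of_find_eq (l u : List Char) (m : Nat)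
    (h : PySem.Chars.find l u = (m : Int)) : u <+: l.drop m := by
  have h0 : 0 ≤ PySem.Chars.find l u := by omega
  obtain ⟨hpre, _⟩ := PySem.Chars.find_spec (s := l) (sub := u) h0
  have : (PySem.Chars.find l u).toNat = m := by omega
  rwa [this] at hpre

theorem cwf_find_eq_coe (l u : List Char) (m : Nat)
    (h1 : u <+: l.drop m) (h2 : ∀ i < m, ¬ u <+: l.drop i) :
    PySem.Chars.find l u = (m : Int) := by
  have hinf : u <:+: l := ((h1.isInfix).trans ((List.drop_suffix m l).isInfix))
  have hne : PySem.Chars.find l u ≠ -1 := (PySem.Chars.find_ne_neg_one_iff _ _).mpr hinf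
  have h0 : 0 ≤ PySem.Chars.find l u := by
    have := PySem.Chars.neg_one_le_find (s := l) (sub := u); omega
  obtain ⟨hpre, hmin⟩ := PySem.Chars.find_spec (s := l) (sub := u) h0
  rcases lt_trichotomy (PySem.Chars.find l u).toNat m with hlt | heq | hgt
  · exact absurd hpre (h2 _ hlt)
  · omega
  · exact absurd h1 (hmin m hgt)

-- A-side phase lemmas over the fold
theorem cwf_foldl_allneg (line : String) (ws : List String) (p v x : Int)
    (h : ∀ u ∈ ws, PySem.Str.find line u = -1) :
    ws.foldl (cwfStep line) (p, v, x) = (p, v, x + ws.length) := by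
  induction ws generalizing x with
  | nil => simp
  | cons w rest ih =>
    have hw := h w (by simp)
    simp only [List.foldl_cons, cwfStep, hw]
    rw [if_neg (by omega)]
    rw [ih (x + 1) (fun u hu => h u (List.mem_cons_of_mem _ hu))]
    simp only [List.length_cons, Prod.mk.injEq]
    exact ⟨trivial, trivial, by push_cast; ring⟩

theorem cwf_foldl_skip (line : String) (ws : List String) (p v x : Int) (hv : v ≠ 0)
    (h : ∀ u ∈ ws, PySem.Str.find line u = -1 ∨ p ≤ PySem.Str.find line u) :
    ws.foldl (cwfStep line) (p, v, x) = (p, v, x + ws.length) := by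
  induction ws generalizing x with
  | nil => simp
  | cons w rest ih =>
    have hw := h w (by simp)
    simp only [List.foldl_cons, cwfStep]
    rw [if_neg (by rcases hw with hw | hw <;> simp_all)]
    rw [ih (x + 1) (fun u hu => h u (List.mem_cons_of_mem _ hu))]
    simp only [List.length_cons, Prod.mk.injEq]
    exact ⟨trivial, trivial, by push_cast; ring⟩

theorem cwf_foldl_pre (line : String) (m : Nat) (ws : List String) :
    ∀ (p v x : Int), 0 ≤ x → ((p = 0 ∧ v = 0) ∨ (v ≠ 0 ∧ (m : Int) < p)) →
    (∀ u ∈ ws, PySem.Str.find line u = -1 ∨ (m : Int) < PySem.Str.find line u) →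
    ∃ p' v', ws.foldl (cwfStep line) (p, v, x) = (p', v', x + ws.length) ∧
      ((p' = 0 ∧ v' = 0) ∨ (v' ≠ 0 ∧ (m : Int) < p')) := by
  induction ws with
  | nil => intro p v x _ hP _; exact ⟨p, v, by simp, hP⟩
  | cons w rest ih =>
    intro p v x hx hP h
    have hw := h w (by simp)
    simp only [List.foldl_cons, cwfStep]
    by_cases hc : PySem.Str.find line w > -1 ∧ (PySem.Str.find line w < p ∨ v = 0)
    · rw [if_pos hc]
      obtain ⟨p', v', heq, hP'⟩ := ih (PySem.Str.find line w) (x + 1) (x + 1) (by omega)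
        (Or.inr ⟨by omega, by rcases hw with hw | hw <;> omega⟩)
        (fun u hu => h u (List.mem_cons_of_mem _ hu))
      refine ⟨p', v', ?_, hP'⟩
      rw [heq]
      simp only [List.length_cons, Prod.mk.injEq]
      exact ⟨trivial, trivial, by push_cast; ring⟩
    · rw [if_neg hc]
      obtain ⟨p', v', heq, hP'⟩ := ih p v (x + 1) (by omega) hP (fun u hu => h u (List.mem_cons_of_mem _ hu))
      refine ⟨p', v', ?_, hP'⟩
      rw [heq]
      simp only [List.length_cons, Prod.mk.injEq]
      exact ⟨trivial, trivial, by push_cast; ring⟩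

theorem cwf_foldA_split (line : String) (ws1 ws2 : List String) (w : String) (m : Nat)
    (hall : ∀ u ∈ ws1, PySem.Str.find line u = -1 ∨ (m : Int) < PySem.Str.find line u)
    (hw : PySem.Str.find line w = (m : Int))
    (h2 : ∀ u ∈ ws2, PySem.Str.find line u = -1 ∨ (m : Int) ≤ PySem.Str.find line u) :
    ((ws1 ++ w :: ws2).foldl (cwfStep line) (0, 0, 0)).1 = (m : Int) ∧
    ((ws1 ++ w :: ws2).foldl (cwfStep line) (0, 0, 0)).2.1 = (ws1.length : Int) + 1 := by
  rw [List.foldl_append]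
  obtain ⟨p1, v1, heq1, hP1⟩ := cwf_foldl_pre line m ws1 0 0 0 le_rfl (Or.inl ⟨rfl, rfl⟩) hall
  rw [heq1]
  simp only [List.foldl_cons, cwfStep, hw]
  rw [if_pos (by
    refine ⟨by omega, ?_⟩
    rcases hP1 with ⟨_, hv⟩ | ⟨_, hp⟩
    · exact Or.inr hv
    · exact Or.inl hp)]
  rw [cwf_foldl_skip line ws2 (m : Int) ((0 : Int) + ws1.length + 1) ((0 : Int) + ws1.length + 1)
    (by omega) h2]
  exact ⟨rfl, by simp⟩

-- B-side lemmas
theorem cwf_inner_none (suf : List Char) (ws : List String) (j : Int)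
    (h : ∀ w ∈ ws, ¬ w.toList <+: suf) : cwfInner suf ws j = none := by
  induction ws generalizing j with
  | nil => rfl
  | cons w rest ih =>
    simp only [cwfInner]
    rw [if_neg (by
      intro hsw
      exact h w (by simp) ((PySem.Chars.startswith_iff _ _).mp hsw))]
    exact ih (j + 1) (fun u hu => h u (by simp [hu]))

theorem cwf_inner_split (suf : List Char) (ws1 : List String) (w : String) (ws2 : List String) :
    ∀ (j : Int), (∀ u ∈ ws1, ¬ u.toList <+: suf) → w.toList <+: suf →
    cwfInner suf (ws1 ++ w :: ws2) j = some (j + ws1.length + 1) := by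
  induction ws1 with
  | nil =>
    intro j _ hw
    simp only [List.nil_append, cwfInner]
    rw [if_pos ((PySem.Chars.startswith_iff _ _).mpr hw)]
    simp
  | cons u rest ih =>
    intro j h hw
    simp only [List.cons_append, cwfInner]
    rw [if_neg (by
      intro hsw
      exact h u (by simp) ((PySem.Chars.startswith_iff _ _).mp hsw))]
    rw [ih (j + 1) (fun u' hu => h u' (List.mem_cons_of_mem _ hu)) hw]
    congr 1
    simp only [List.length_cons]
    push_cast
    ring

theorem cwf_exists_split (suf : List Char) (ws : List String)
    (h : ∃ w ∈ ws, w.toList <+: suf) :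
    ∃ ws1 w ws2, ws = ws1 ++ w :: ws2 ∧ (∀ u ∈ ws1, ¬ u.toList <+: suf) ∧ w.toList <+: suf := by
  induction ws with
  | nil => simp at h
  | cons w rest ih =>
    by_cases hw : w.toList <+: suf
    · exact ⟨[], w, rest, rfl, by simp, hw⟩
    · obtain ⟨w', hw'mem, hw'⟩ := h
      rcases List.mem_cons.mp hw'mem with rfl | hmem
      · exact absurd hw' hw
      · obtain ⟨ws1, w'', ws2, hsplit, hws1, hpre⟩ := ih ⟨w', hmem, hw'⟩
        exact ⟨w :: ws1, w'', ws2, by simp [hsplit], by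
          intro u hu
          rcases List.mem_cons.mp hu with rfl | hu'
          · exact hw
          · exact hws1 u hu', hpre⟩

theorem cwf_scan_none : ∀ (l : List Char) (i : Int),
    (∀ w ∈ cwfNumbers, ¬ w.toList <:+: l) → cwfScan l i = (0, 0) := by
  intro l
  induction l with
  | nil => intro i _; rfl
  | cons c t ih =>
    intro i h
    simp only [cwfScan]
    rw [cwf_inner_none (c :: t) cwfNumbers 0
      (fun w hw hpre => h w hw hpre.isInfix)]
    exact ih (i + 1) (fun w hw hinf => h w hw (hinf.trans (List.suffix_cons c t).isInfix))

theorem cwf_scan_reach (m : Nat) : ∀ (l : List Char) (i : Int) (v : Int),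
    (∀ i' < m, ∀ w ∈ cwfNumbers, ¬ w.toList <+: l.drop i') →
    m < l.length →
    cwfInner (l.drop m) cwfNumbers 0 = some v →
    cwfScan l i = (v, i + m) := by
  induction m with
  | zero =>
    intro l i v _ hlen hinner
    match l, hlen with
    | c :: t, _ =>
      simp only [cwfScan]
      simp only [List.drop_zero] at hinner
      rw [hinner]
      simp
  | succ m ihm =>
    intro l i v hno hlen hinner
    match l, hlen with
    | c :: t, hlen =>
      simp only [cwfScan]
      rw [cwf_inner_none (c :: t) cwfNumbers 0 (by
        have := hno 0 (Nat.succ_pos m)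
        simpa using this)]
      have hrec := ihm t (i + 1) v
        (fun i' hi' w hw => by
          have := hno (i' + 1) (by omega) w hw
          simpa using this)
        (by simpa using hlen)
        (by simpa using hinner)
      rw [hrec]
      simp only [Prod.mk.injEq]
      refine ⟨trivial, ?_⟩
      push_cast
      ring

-- each number word is nonempty
theorem cwf_numbers_ne_nil : ∀ w ∈ cwfNumbers, w.toList ≠ [] := by decide

-- ===== VERDICT (by name: the statement is the Claim_ definition above) =====
theorem checkWordFront_spec : Claim_equal_checkWordFront := by
  unfold Claim_equal_checkWordFront
  intro line _
  unfold Spec_checkWordFront checkWordFront checkWordFront_alt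
  by_cases hEx : ∃ i : Nat, ∃ w ∈ cwfNumbers, w.toList <+: line.toList.drop i
  · classical
    obtain ⟨w0, hw0mem, hw0pre⟩ := Nat.find_spec hEx
    set m := Nat.find hEx with hm
    have hmin : ∀ i < m, ∀ w ∈ cwfNumbers, ¬ w.toList <+: line.toList.drop i := by
      intro i hi w hw hpre
      exact Nat.find_min hEx hi ⟨w, hw, hpre⟩
    have hlen : m < line.toList.length := by
      have hne : w0.toList ≠ [] := cwf_numbers_ne_nil w0 hw0mem
      by_contra hge
      have : line.toList.drop m = [] := List.drop_eq_nil_of_le (by omega)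
      rw [this] at hw0pre
      exact hne (List.prefix_nil.mp hw0pre)
    obtain ⟨ws1, w, ws2, hsplit, hws1, hwpre⟩ :=
      cwf_exists_split (line.toList.drop m) cwfNumbers ⟨w0, hw0mem, hw0pre⟩
    -- B side
    have hinner := cwf_inner_split (line.toList.drop m) ws1 w ws2 0 hws1 hwpre
    rw [← hsplit] at hinner
    have hB : cwfScan line.toList 0 = ((0 : Int) + ws1.length + 1, (0 : Int) + m) :=
      cwf_scan_reach m line.toList 0 _ hmin hlen hinner
    -- A side find facts
    have hmemOf : ∀ u ∈ ws1 ++ w :: ws2, u ∈ cwfNumbers := fun u hu => hsplit ▸ hu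
    have hge : ∀ u ∈ cwfNumbers,
        PySem.Str.find line u = -1 ∨ (m : Int) ≤ PySem.Str.find line u := by
      intro u hu
      have := cwf_find_ge_of line.toList u.toList m (fun i hi => hmin i hi u hu)
      simpa using this
    have hwfind : PySem.Str.find line w = (m : Int) := by
      have := cwf_find_eq_coe line.toList w.toList m hwpre
        (fun i hi => hmin i hi w (hmemOf w (by simp)))
      simpa using this
    have hws1find : ∀ u ∈ ws1,
        PySem.Str.find line u = -1 ∨ (m : Int) < PySem.Str.find line u := by
      intro u hu
      rcases hge u (hmemOf u (by simp [hu])) with h | h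
      · exact Or.inl h
      · right
        rcases lt_or_eq_of_le h with h' | h'
        · exact h'
        · exfalso
          exact hws1 u hu (cwf_prefix_of_find_eq line.toList u.toList m (by simpa using h'.symm))
    have hws2find : ∀ u ∈ ws2,
        PySem.Str.find line u = -1 ∨ (m : Int) ≤ PySem.Str.find line u :=
      fun u hu => hge u (hmemOf u (by simp [hu]))
    have hA := cwf_foldA_split line ws1 ws2 w m hws1find hwfind hws2find
    rw [← hsplit] at hA
    rw [hB]
    obtain ⟨hA1, hA2⟩ := hA
    show ((cwfNumbers.foldl (cwfStep line) (0, 0, 0)).2.1,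
          (cwfNumbers.foldl (cwfStep line) (0, 0, 0)).1) = _
    rw [hA1, hA2]
    simp
  · -- no number word occurs anywhere
    have hninf : ∀ w ∈ cwfNumbers, ¬ w.toList <:+: line.toList := by
      intro w hw hinf
      have : PySem.Chars.isIn w.toList line.toList = true :=
        (PySem.Chars.isIn_iff_infix _ _).mpr hinf
      obtain ⟨j, hj⟩ := (PySem.Chars.exists_prefix_drop_iff_isIn _ _).mpr this
      exact hEx ⟨j, w, hw, hj⟩
    have hfinds : ∀ u ∈ cwfNumbers, PySem.Str.find line u = -1 := by
      intro u hu
      have := (PySem.Chars.find_eq_neg_one_iff line.toList u.toList).mpr (hninf u hu)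
      simpa using this
    rw [cwf_foldl_allneg line cwfNumbers 0 0 0 hfinds]
    rw [cwf_scan_none line.toList 0 hninf]
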